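-- pv_equiv track=rewrite | github.com/amar1795/DSA-Practice | Arrays/elemnt_greater_than_1.py | solve
-- ===== SOURCE A (Python) =====
-- def solve(A):
--     max_value = 0
--     max_count = 0
--     for x in A:
--         if x == max_value:
--             max_count += 1
--         elif x > max_value:
--             max_count = 1
--             max_value = x
--     return len(A) - max_count
-- ===== SOURCE B (Python) =====
-- def solve(A):
--     if not A:
--         return 0
--     m = max(A)
--     return len(A) - A.count(m)
-- ===== Notes on version B (the rewrite author's own statement) =====
-- stated objective: simpler
-- what changed: Replaces the single running-max/count state machine by the direct formula len(A) - A.count(max(A)) using built-ins, guarding the empty list.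
-- intended difference: On nonempty lists whose elements are all negative, A's running max is seeded at 0 so it returns len(A), while B returns len(A) - A.count(max(A)), the intended count of elements not equal to the maximum. — e.g. on solve([-3, -1, -1]): A returns 3, B returns 1
import Mathlib
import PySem

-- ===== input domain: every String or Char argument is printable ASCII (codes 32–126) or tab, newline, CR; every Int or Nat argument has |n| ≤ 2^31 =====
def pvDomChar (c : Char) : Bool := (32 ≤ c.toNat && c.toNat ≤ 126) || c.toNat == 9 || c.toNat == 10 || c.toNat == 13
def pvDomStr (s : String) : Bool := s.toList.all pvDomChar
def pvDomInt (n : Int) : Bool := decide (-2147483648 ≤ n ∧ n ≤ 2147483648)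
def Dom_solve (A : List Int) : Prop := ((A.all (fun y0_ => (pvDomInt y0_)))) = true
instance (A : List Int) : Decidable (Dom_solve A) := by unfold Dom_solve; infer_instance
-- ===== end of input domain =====

-- B replaces A's running-max/count state machine by len(A) - A.count(max(A)); on all-negative
-- lists A's 0-seeded running max makes it return len(A), stated as the intended difference D_ below.

-- ===== PORT A =====
def solve (A : List Int) : Int :=
  let s := A.foldl
    (fun (p : Int × Int) x =>
      if x = p.1 then (p.1, p.2 + 1)
      else if x > p.1 then (x, 1)
      else p)
    ((0 : Int), (0 : Int))
  (A.length : Int) - s.2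

-- ===== PORT B =====
def solve_alt (A : List Int) : Int :=
  match PySem.List.max? A (fun y => y) with
  | none => 0
  | some m => (A.length : Int) - (PySem.List.count A m : Int)

-- ===== PRECONDITION & SPEC =====
-- On nonempty lists whose elements are all negative, A's running max is seeded at 0 so it
-- returns len(A); B returns len(A) - A.count(max(A)), the intended count of elements ≠ max.
def D_solve (A : List Int) : Prop := A ≠ [] ∧ ∀ x ∈ A, x < 0
instance (A : List Int) : Decidable (D_solve A) := by unfold D_solve; infer_instance

def Spec_solve (A : List Int) (out : Int) : Prop := ¬ D_solve A → out = solve_alt A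
instance (A : List Int) (out : Int) : Decidable (Spec_solve A out) := by unfold Spec_solve; infer_instance

def pvDiffWitness_solve : List Int := [-3, -1, -1]
def pvDiffWitnessOut_solve : Int × Int := (3, 1)

-- ===== CLAIM (what is proved, stated in full; the proofs are below) =====
def Claim_unchanged_solve : Prop := ∀ (A : List Int), Dom_solve A → Spec_solve A (solve A)
def Claim_changed_solve : Prop := Dom_solve (pvDiffWitness_solve) ∧ D_solve (pvDiffWitness_solve) ∧ solve (pvDiffWitness_solve) = pvDiffWitnessOut_solve.1 ∧ solve_alt (pvDiffWitness_solve) = pvDiffWitnessOut_solve.2 ∧ pvDiffWitnessOut_solve.1 ≠ pvDiffWitnessOut_solve.2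
def Claim_exact_solve : Prop := ∀ (A : List Int), Dom_solve A → D_solve A → solve A ≠ solve_alt A

-- ===== LEMMAS AND PROOFS =====

-- A's loop body, and the running max it maintains
def pvStep (p : Int × Int) (x : Int) : Int × Int :=
  if x = p.1 then (p.1, p.2 + 1) else if x > p.1 then (x, 1) else p

lemma le_foldl_maxInt (A : List Int) (m : Int) : m ≤ A.foldl max m := by
  induction A generalizing m with
  | nil => simp
  | cons x t ih => exact le_trans (le_max_left m x) (ih (max m x))

lemma mem_le_foldl_maxInt (A : List Int) (m : Int) : ∀ x ∈ A, x ≤ A.foldl max m := by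
  induction A generalizing m with
  | nil => simp
  | cons y t ih =>
    intro x hx
    rcases List.mem_cons.mp hx with h | h
    · rw [List.foldl_cons, h]
      exact le_trans (le_max_right m y) (le_foldl_maxInt t (max m y))
    · rw [List.foldl_cons]; exact ih (max m y) x h

lemma foldl_maxInt_mem (A : List Int) (m : Int) : A.foldl max m = m ∨ A.foldl max m ∈ A := by
  induction A generalizing m with
  | nil => simp
  | cons y t ih =>
    rcases ih (max m y) with h | h
    · rw [List.foldl_cons, h]
      rcases max_choice m y with hc | hc
      · left; exact hc
      · right; rw [hc]; exact List.mem_cons_self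
    · right; rw [List.foldl_cons]; exact List.mem_cons_of_mem y h

-- invariant of A's fold: first component is the running max, second the count of it
lemma pvStep_inv (A : List Int) (m c : Int) :
    A.foldl pvStep (m, c) =
      (A.foldl max m,
        if A.foldl max m = m then c + (A.count m : Int) else (A.count (A.foldl max m) : Int)) := by
  induction A generalizing m c with
  | nil => simp
  | cons x t ih =>
    by_cases hx : x = m
    · subst hx
      have hstep : pvStep (x, c) x = (x, c + 1) := by simp [pvStep]
      simp only [List.foldl_cons, hstep, ih, max_self]
      by_cases hM : t.foldl max x = x
      · simp [hM]; ring
      · simp [hM, List.count_cons]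
        intro h; exact absurd h.symm hM
    · by_cases hgt : x > m
      · have hstep : pvStep (m, c) x = (x, 1) := by simp [pvStep, hx, hgt]
        have hmax : max m x = x := max_eq_right (le_of_lt hgt)
        simp only [List.foldl_cons, hstep, ih, hmax]
        have hge : x ≤ t.foldl max x := le_foldl_maxInt t x
        have hne : t.foldl max x ≠ m := by omega
        by_cases hM : t.foldl max x = x
        · simp [hM, hx]; omega
        · have hne2 : t.foldl max x ≠ x := hM
          simp [hM, hne, List.count_cons]
          intro h; exact absurd h.symm hne2
      · have hlt : x < m := lt_of_le_of_ne (le_of_not_gt hgt) hx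
        have hstep : pvStep (m, c) x = (m, c) := by simp [pvStep, hx, hgt]
        have hmax : max m x = m := max_eq_left (le_of_lt hlt)
        simp only [List.foldl_cons, hstep, ih, hmax]
        have hge : m ≤ t.foldl max m := le_foldl_maxInt t m
        by_cases hM : t.foldl max m = m
        · have : x ≠ m := hx
          simp [hM, this]
        · have hne2 : t.foldl max m ≠ x := by omega
          simp [hM, List.count_cons]
          intro h; exact absurd h.symm hne2

lemma solve_eq_count (A : List Int) :
    solve A = (A.length : Int) - (A.count (A.foldl max 0) : Int) := by
  unfold solve
  have h : A.foldl (fun (p : Int × Int) x =>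
      if x = p.1 then (p.1, p.2 + 1) else if x > p.1 then (x, 1) else p) ((0 : Int), (0 : Int))
      = A.foldl pvStep ((0 : Int), (0 : Int)) := rfl
  rw [h, pvStep_inv]
  by_cases hM : A.foldl max 0 = 0
  · simp [hM]
  · simp [hM]

-- ===== VERDICT (by name: the statement is the Claim_ definition above) =====
theorem solve_spec : Claim_unchanged_solve := by
  intro A _ hnD
  rw [solve_eq_count]
  unfold solve_alt
  cases hA : A with
  | nil => simp [PySem.List.max?]
  | cons y t =>
    rw [← hA]
    have hmax : PySem.List.max? A (fun y => y) = some (t.foldl max y) := by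
      rw [hA]; exact PySem.List.max?_id_cons y t
    rw [hmax]
    -- outside D_: some element is ≥ 0, hence the 0-seeded max equals the true max
    have hex : ∃ x ∈ A, 0 ≤ x := by
      unfold D_solve at hnD
      push Not at hnD
      rcases hnD (by simp [hA]) with ⟨x, hx, hx0⟩
      exact ⟨x, hx, le_of_not_gt (by omega)⟩
    have hm_mem : t.foldl max y ∈ A := by
      rcases foldl_maxInt_mem t y with h | h
      · rw [hA]; rw [h]; exact List.mem_cons_self
      · rw [hA]; exact List.mem_cons_of_mem y h
    have hm_max : ∀ x ∈ A, x ≤ t.foldl max y := by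
      intro x hx
      rw [hA] at hx
      rcases List.mem_cons.mp hx with h | h
      · rw [h]; exact le_foldl_maxInt t y
      · exact mem_le_foldl_maxInt t y x h
    have h0_le : t.foldl max y ≤ A.foldl max 0 := mem_le_foldl_maxInt A 0 _ hm_mem
    have h0_eq : A.foldl max 0 = t.foldl max y := by
      rcases foldl_maxInt_mem A 0 with h | h
      · rcases hex with ⟨x, hx, hx0⟩
        have := hm_max x hx
        have := mem_le_foldl_maxInt A 0 x hx
        omega
      · have := hm_max _ h
        omega
    rw [h0_eq]
    simp [PySem.List.count]

theorem solve_changed : Claim_changed_solve := by unfold Claim_changed_solve; decide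

theorem solve_tight : Claim_exact_solve := by
  intro A _ hD
  rcases hD with ⟨hne, hneg⟩
  rw [solve_eq_count]
  cases hA : A with
  | nil => exact absurd hA hne
  | cons y t =>
    rw [← hA]
    unfold solve_alt
    have hmax : PySem.List.max? A (fun y => y) = some (t.foldl max y) := by
      rw [hA]; exact PySem.List.max?_id_cons y t
    rw [hmax]
    have h0 : A.foldl max 0 = 0 := by
      rcases foldl_maxInt_mem A 0 with h | h
      · exact h
      · have := hneg _ h
        have := le_foldl_maxInt A 0
        omega
    have hc0 : A.count (0 : Int) = 0 := by
      rw [List.count_eq_zero]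
      intro h
      exact absurd (hneg _ h) (by omega)
    have hm_mem : t.foldl max y ∈ A := by
      rcases foldl_maxInt_mem t y with h | h
      · rw [hA]; rw [h]; exact List.mem_cons_self
      · rw [hA]; exact List.mem_cons_of_mem y h
    have hcpos : 0 < A.count (t.foldl max y) := List.count_pos_iff.mpr hm_mem
    rw [h0, hc0]
    simp [PySem.List.count]
    omega
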